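-- pv_equiv track=rewrite | github.com/MrBrantCode/unitest_baseline | mut_generate/mist_train_cf/cf_81695/solution.py | find_dissimilar
-- ===== SOURCE A (Python) =====
-- def find_dissimilar(t1, t2):
--     d1, d2 = {}, {}
--     for el in t1:
--         if el not in t2:
--             d1[el] = (d1.get(el, (0,0))[0] + 1, 1)
--     for el in t2:
--         if el not in t1:
--             d2[el] = (d2.get(el, (0,0))[0] + 1, 2)
--     result = {**d1, **d2}
--     common = set(t1) & set(t2)
--     for el in common:
--         result[el] = (t1.count(el), t2.count(el))
--     return result
-- ===== SOURCE B (Python) =====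
-- def find_dissimilar(t1, t2):
--     # Peel-based: repeatedly strip every copy of the current head element;
--     # its count is the length drop, classified by membership in the other list.
--     def peel(t, other):
--         excl, com = [], []
--         while t:
--             x = t[0]
--             rest = [e for e in t if e != x]
--             pair = (x, len(t) - len(rest))
--             (com if x in other else excl).append(pair)
--             t = rest
--         return excl, com
--
--     ex1, com1 = peel(t1, t2)
--     ex2, com2 = peel(t2, t1)
--     d2 = dict(com2)
--     res = {k: (n, 1) for k, n in ex1}
--     res.update((k, (n, 2)) for k, n in ex2)
--     res.update((k, (n1, d2[k])) for k, n1 in com1)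
--     return res
-- ===== Notes on version B (the rewrite author's own statement) =====
-- stated objective: alternative
-- what changed: B repeatedly peels all copies of the current head element off each list (count = length drop of the filtered remainder), instead of A's per-element membership tests into two dicts, a dict merge and per-common-key .count rescans; the three result groups are assembled once from the peeled (key,count) pairs.
import Mathlib
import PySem

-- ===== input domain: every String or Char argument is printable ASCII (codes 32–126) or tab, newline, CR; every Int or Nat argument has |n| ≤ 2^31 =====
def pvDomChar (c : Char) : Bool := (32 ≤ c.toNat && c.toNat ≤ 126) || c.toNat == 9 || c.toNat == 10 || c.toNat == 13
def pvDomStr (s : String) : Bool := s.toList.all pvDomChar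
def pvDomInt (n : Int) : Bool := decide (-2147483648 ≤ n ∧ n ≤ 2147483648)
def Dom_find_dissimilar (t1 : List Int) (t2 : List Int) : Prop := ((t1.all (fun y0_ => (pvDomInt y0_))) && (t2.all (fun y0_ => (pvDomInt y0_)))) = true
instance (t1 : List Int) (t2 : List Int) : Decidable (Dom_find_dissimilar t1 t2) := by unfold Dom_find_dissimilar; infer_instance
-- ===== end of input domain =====

-- B replaces A's per-element membership scans, dict merge and per-common-key .count rescans
-- by a peeling loop (strip all copies of the head; the count is the length drop) and one
-- assembly of the three result groups (return-value equivalence; neither version mutates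
-- its arguments). A's common keys come from set iteration, which the Lean port (like the
-- dict comparison used for checking) takes in first-insertion order.

-- ===== PORT A =====
-- d1/d2: the two 'if el not in …' counting loops; result = {**d1, **d2}; then the common loop.
def find_dissimilar (t1 : List Int) (t2 : List Int) : List (Int × Int × Int) :=
  let d1 : PySem.Dict Int (Int × Int) :=
    t1.foldl (fun d el =>
      if el ∉ t2 then d.insert el ((d.getD el (0, 0)).1 + 1, 1) else d) PySem.Dict.empty
  let d2 : PySem.Dict Int (Int × Int) :=
    t2.foldl (fun d el =>
      if el ∉ t1 then d.insert el ((d.getD el (0, 0)).1 + 1, 2) else d) PySem.Dict.empty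
  let result := d1.update d2.items
  let common := PySem.Set.inter (PySem.Set.ofList t1) (PySem.Set.ofList t2)
  let result := common.foldl (fun r el =>
    r.insert el ((t1.count el : Int), (t2.count el : Int))) result
  result.items

-- ===== PORT B =====
-- The 'while t:' peeling loop of Source B, with its two accumulator lists.
def peelLoop (t other : List Int) (excl com : List (Int × Int)) :
    List (Int × Int) × List (Int × Int) :=
  match t with
  | [] => (excl, com)
  | x :: tl =>
    let rest := (x :: tl).filter (fun e => !(e == x))
    let n : Int := ((x :: tl).length : Int) - (rest.length : Int)
    if x ∈ other then peelLoop rest other excl (com ++ [(x, n)])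
    else peelLoop rest other (excl ++ [(x, n)]) com
termination_by t.length
decreasing_by
  all_goals
    simp only [List.filter_cons, beq_self_eq_true, Bool.not_true, List.length_cons]
    exact Nat.lt_succ_of_le (List.length_filter_le _ _)

-- peel of each list, then d2 = dict(com2) and the three-group assembly.
-- d2[k] cannot raise KeyError (every common key of t1 occurs in com2), ported as getD.
def find_dissimilar_alt (t1 : List Int) (t2 : List Int) : List (Int × Int × Int) :=
  let p1 := peelLoop t1 t2 [] []
  let ex1 := p1.1
  let com1 := p1.2
  let p2 := peelLoop t2 t1 [] []
  let ex2 := p2.1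
  let com2 := p2.2
  let d2 : PySem.Dict Int Int := PySem.Dict.ofList com2
  let res : PySem.Dict Int (Int × Int) :=
    ex1.foldl (fun r p => r.insert p.1 (p.2, 1)) PySem.Dict.empty
  let res := res.update (ex2.map (fun p => (p.1, (p.2, (2 : Int)))))
  let res := res.update (com1.map (fun p => (p.1, (p.2, d2.getD p.1 0))))
  res.items

-- ===== PRECONDITION & SPEC =====
def Spec_find_dissimilar (t1 : List Int) (t2 : List Int) (out : List (Int × Int × Int)) : Prop := out = find_dissimilar_alt t1 t2
instance (t1 : List Int) (t2 : List Int) (out : List (Int × Int × Int)) : Decidable (Spec_find_dissimilar t1 t2 out) := by unfold Spec_find_dissimilar; infer_instance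

-- ===== CLAIM (what is proved, stated in full; the proofs are below) =====
def Claim_equal_find_dissimilar : Prop := ∀ (t1 : List Int) (t2 : List Int), Dom_find_dissimilar t1 t2 → Spec_find_dissimilar t1 t2 (find_dissimilar t1 t2)

-- ===== LEMMAS AND PROOFS =====

theorem ofList_filter (p : Int → Bool) (l : List Int) :
    PySem.Set.ofList (l.filter p) = (PySem.Set.ofList l).filter p := by
  induction l using List.reverseRecOn with
  | nil => rfl
  | append_singleton l x ih =>
    rw [List.filter_append, PySem.Set.ofList_append_singleton, List.filter_singleton]
    by_cases hp : p x = true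
    · simp only [hp, cond_true]
      rw [PySem.Set.ofList_append_singleton, ih]
      by_cases hx : x ∈ PySem.Set.ofList l
      · rw [PySem.Set.add_eq_ite ((PySem.Set.ofList l).filter p) x,
          if_pos (List.mem_filter.mpr ⟨hx, hp⟩),
          PySem.Set.add_eq_ite (PySem.Set.ofList l) x, if_pos hx]
      · rw [PySem.Set.add_eq_ite ((PySem.Set.ofList l).filter p) x,
          if_neg (fun h => hx (List.mem_filter.mp h).1),
          PySem.Set.add_eq_ite (PySem.Set.ofList l) x, if_neg hx,
          List.filter_append, List.filter_singleton]
        simp only [hp, cond_true]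
    · have hp' : p x = false := by simpa using hp
      simp only [hp', cond_false, List.append_nil, ih]
      by_cases hx : x ∈ PySem.Set.ofList l
      · rw [PySem.Set.add_eq_ite (PySem.Set.ofList l) x, if_pos hx]
      · rw [PySem.Set.add_eq_ite (PySem.Set.ofList l) x, if_neg hx,
          List.filter_append, List.filter_singleton]
        simp [hp']

theorem step_items (c : Int) (l : List Int) (x : Int) (D : PySem.Dict Int (Int × Int))
    (ih : D.items = (PySem.Set.ofList l).map (fun k => (k, ((l.count k : Int), c)))) :
    (D.insert x ((D.getD x ((0 : Int), (0 : Int))).1 + 1, c)).items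
      = (PySem.Set.ofList (l ++ [x])).map (fun k => (k, (((l ++ [x]).count k : Int), c))) := by
  have hkeys : D.keys = PySem.Set.ofList l := by
    simp [PySem.Dict.keys, ih, Function.comp_def]
  have hnd : D.keys.Nodup := by rw [hkeys]; exact PySem.Set.nodup_ofList l
  by_cases hx : x ∈ l
  · have hxs : x ∈ PySem.Set.ofList l := (PySem.Set.mem_ofList l x).mpr hx
    have hcont : D.contains x = true := by
      rw [PySem.Dict.contains_eq_decide_mem_keys, hkeys]; simpa using hxs
    have hmem : (x, ((l.count x : Int), c)) ∈ D.items := by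
      rw [ih]; exact List.mem_map_of_mem hxs
    have hget : D.getD x ((0 : Int), (0 : Int)) = ((l.count x : Int), c) :=
      PySem.Dict.getD_of_mem_items D hmem hnd _
    rw [hget, PySem.Dict.items_insert_of_contains D _ hcont, ih,
      PySem.Set.ofList_append_singleton, PySem.Set.add_eq_ite, if_pos hxs,
      List.map_map]
    refine List.map_congr_left (fun k hk => ?_)
    simp only [Function.comp]
    by_cases hkx : k = x
    · subst hkx
      simp [List.count_append]
    · have hbe : (k == x) = false := by simp [hkx]
      simp [hbe, List.count_append, List.count_singleton, hkx, Ne.symm hkx]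
  · have hxs : x ∉ PySem.Set.ofList l := fun h => hx ((PySem.Set.mem_ofList l x).mp h)
    have hcont : D.contains x = false := by
      rw [PySem.Dict.contains_eq_decide_mem_keys, hkeys]; simpa using hxs
    rw [PySem.Dict.getD_of_not_contains D _ hcont,
      PySem.Dict.items_insert_of_not_contains D _ hcont, ih,
      PySem.Set.ofList_append_singleton, PySem.Set.add_eq_ite, if_neg hxs,
      List.map_append]
    congr 1
    · refine List.map_congr_left (fun k hk => ?_)
      have hkx : k ≠ x := fun h => hx (h ▸ (PySem.Set.mem_ofList l k).mp hk)
      simp [List.count_append, List.count_singleton, hkx, Ne.symm hkx]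
    · simp [List.count_append, hx, List.count_eq_zero_of_not_mem]

theorem items_countLoop (c : Int) (l : List Int) :
    (l.foldl (fun d el => d.insert el ((d.getD el ((0 : Int), (0 : Int))).1 + 1, c))
        (PySem.Dict.empty : PySem.Dict Int (Int × Int))).items
      = (PySem.Set.ofList l).map (fun k => (k, ((l.count k : Int), c))) := by
  induction l using List.reverseRecOn with
  | nil => rfl
  | append_singleton l x ih =>
    rw [List.foldl_append, List.foldl_cons, List.foldl_nil]
    exact step_items c l x _ ih

-- canonical pieces
def M1 (t1 t2 : List Int) : List (Int × Int × Int) :=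
  ((PySem.Set.ofList t1).filter (fun x => !(t2.contains x))).map
    (fun k => (k, ((t1.count k : Int), (1 : Int))))
def M2 (t1 t2 : List Int) : List (Int × Int × Int) :=
  ((PySem.Set.ofList t2).filter (fun x => !(t1.contains x))).map
    (fun k => (k, ((t2.count k : Int), (2 : Int))))
def M3 (t1 t2 : List Int) : List (Int × Int × Int) :=
  ((PySem.Set.ofList t1).filter (fun x => t2.contains x)).map
    (fun k => (k, ((t1.count k : Int), (t2.count k : Int))))

-- the filtered counting loop of A, fully characterised
theorem dloop_items (t1 t2 : List Int) (c : Int) :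
    (t1.foldl (fun d el =>
        if el ∉ t2 then d.insert el ((d.getD el ((0:Int), (0:Int))).1 + 1, c) else d)
        (PySem.Dict.empty : PySem.Dict Int (Int × Int))).items
      = ((PySem.Set.ofList t1).filter (fun x => !(t2.contains x))).map
          (fun k => (k, ((t1.count k : Int), c))) := by
  simp only [PySem.List.foldl_ite_eq_foldl_filter (p := fun el => el ∉ t2)
    (f := fun (d : PySem.Dict Int (Int × Int)) el => d.insert el ((d.getD el ((0:Int), (0:Int))).1 + 1, c))]
  rw [items_countLoop, ofList_filter]
  have hpq : ∀ x ∈ PySem.Set.ofList t1, (decide (x ∉ t2)) = !(t2.contains x) := by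
    intro x _; simp
  rw [List.filter_congr hpq]
  refine List.map_congr_left (fun k hk => ?_)
  have hpk : (decide (k ∉ t2)) = true := by
    have := (List.mem_filter.mp hk).2
    simpa using this
  rw [List.count_filter (p := fun x => decide (x ∉ t2)) hpk]

theorem contains_ofList (t : List Int) (x : Int) :
    (PySem.Set.ofList t).contains x = t.contains x := by
  by_cases h : x ∈ t <;>
    simp [PySem.Set.contains, List.contains_iff_mem, PySem.Set.mem_ofList, h]

theorem A_items (t1 t2 : List Int) :
    find_dissimilar t1 t2 = M1 t1 t2 ++ M2 t1 t2 ++ M3 t1 t2 := by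
  simp only [find_dissimilar]
  have h1 := dloop_items t1 t2 1
  have h2 := dloop_items t2 t1 2
  set d1 := t1.foldl (fun d el =>
      if el ∉ t2 then d.insert el ((d.getD el ((0:Int), (0:Int))).1 + 1, 1) else d)
      (PySem.Dict.empty : PySem.Dict Int (Int × Int)) with hd1
  set d2 := t2.foldl (fun d el =>
      if el ∉ t1 then d.insert el ((d.getD el ((0:Int), (0:Int))).1 + 1, 2) else d)
      (PySem.Dict.empty : PySem.Dict Int (Int × Int)) with hd2
  have hk1 : d1.keys = (PySem.Set.ofList t1).filter (fun x => !(t2.contains x)) := by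
    simp [PySem.Dict.keys, h1, Function.comp_def]
  have hfresh : ∀ a ∈ d2.items, d1.contains a.1 = false := by
    intro a ha
    rw [h2] at ha
    obtain ⟨k, hk, rfl⟩ := List.mem_map.mp ha
    have hknot : k ∉ t1 := by simpa using (List.mem_filter.mp hk).2
    rw [PySem.Dict.contains_eq_decide_mem_keys, hk1]
    simp [List.mem_filter, PySem.Set.mem_ofList, hknot]
  have hnod2 : (d2.items.map (fun p => p.1)).Nodup := by
    simp only [h2, List.map_map, Function.comp_def]
    simpa using (PySem.Set.nodup_ofList t2).filter (fun x => !(t1.contains x))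
  have hu : (d1.update d2.items).items = M1 t1 t2 ++ M2 t1 t2 := by
    show (d2.items.foldl (fun acc p => acc.insert p.1 p.2) d1).items = _
    rw [PySem.Dict.items_foldl_insert_fresh d2.items (fun p => p.1) (fun p => p.2) d1
      hfresh hnod2, h1, h2]
    simp [M1, M2]
  have hku : (d1.update d2.items).keys
      = (PySem.Set.ofList t1).filter (fun x => !(t2.contains x))
        ++ (PySem.Set.ofList t2).filter (fun x => !(t1.contains x)) := by
    simp [PySem.Dict.keys, hu, M1, M2, Function.comp_def]
  have hcommon : PySem.Set.inter (PySem.Set.ofList t1) (PySem.Set.ofList t2)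
      = (PySem.Set.ofList t1).filter (fun x => t2.contains x) := by
    show (PySem.Set.ofList t1).filter (fun x => (PySem.Set.ofList t2).contains x) = _
    exact List.filter_congr (fun x _ => contains_ofList t2 x)
  rw [hcommon]
  have hfresh2 : ∀ a ∈ (PySem.Set.ofList t1).filter (fun x => t2.contains x),
      (d1.update d2.items).contains a = false := by
    intro a ha
    have ha1 : a ∈ t1 := (PySem.Set.mem_ofList t1 a).mp (List.mem_filter.mp ha).1
    have ha2 : a ∈ t2 := by simpa [List.contains_iff_mem] using (List.mem_filter.mp ha).2
    rw [PySem.Dict.contains_eq_decide_mem_keys, hku]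
    simp [List.mem_filter, PySem.Set.mem_ofList, ha1, ha2]
  have hnodc : ((PySem.Set.ofList t1).filter (fun x => t2.contains x)).Nodup :=
    (PySem.Set.nodup_ofList t1).filter _
  have hfold := PySem.Dict.items_foldl_insert_fresh
    ((PySem.Set.ofList t1).filter (fun x => t2.contains x)) (fun a => a)
    (fun el => ((t1.count el : Int), (t2.count el : Int))) (d1.update d2.items)
    hfresh2 (by simpa using hnodc)
  rw [hfold, hu]
  rfl

-- ===== B-side characterisation =====

-- the exclusive / common (key, count) pair lists the peeling loop produces
def ExP (t other : List Int) : List (Int × Int) :=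
  ((PySem.Set.ofList t).filter (fun k => !(other.contains k))).map
    (fun k => (k, (t.count k : Int)))
def CmP (t other : List Int) : List (Int × Int) :=
  ((PySem.Set.ofList t).filter (fun k => other.contains k)).map
    (fun k => (k, (t.count k : Int)))

theorem ofList_cons_peel (x : Int) (tl : List Int) :
    PySem.Set.ofList (x :: tl) = x :: PySem.Set.ofList (tl.filter (fun e => !(e == x))) := by
  rw [PySem.Set.ofList_cons, ofList_filter]
  rfl

theorem countP_not_add (p : Int → Bool) (l : List Int) :
    List.countP p l + List.countP (fun e => !(p e)) l = l.length := by
  induction l with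
  | nil => simp
  | cons a l ih => by_cases h : p a <;> simp [List.countP_cons, h] <;> omega

theorem rest_eq (x : Int) (tl : List Int) :
    (x :: tl).filter (fun e => !(e == x)) = tl.filter (fun e => !(e == x)) := by
  simp [List.filter_cons]

theorem count_head_peel (x : Int) (tl : List Int) :
    ((x :: tl).count x : Int)
      = (((x :: tl).length : Int) - (((x :: tl).filter (fun e => !(e == x))).length : Int)) := by
  have h := countP_not_add (fun e => (e == x)) (x :: tl)
  have hf : ((x :: tl).filter (fun e => !(e == x))).length
      = List.countP (fun e => !(e == x)) (x :: tl) := (List.countP_eq_length_filter).symm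
  have hc : (x :: tl).count x = List.countP (fun e => (e == x)) (x :: tl) := rfl
  rw [hc, hf]
  omega

theorem count_rest_peel (x k : Int) (tl : List Int) (hk : k ≠ x) :
    ((tl.filter (fun e => !(e == x))).count k : Int) = ((x :: tl).count k : Int) := by
  have hk' : ¬x = k := fun h => hk h.symm
  rw [List.count_filter (by simpa using hk), List.count_cons]
  simp [hk']

theorem x_not_mem_rest (x : Int) (tl : List Int) :
    x ∉ PySem.Set.ofList (tl.filter (fun e => !(e == x))) := by
  intro h
  have := (PySem.Set.mem_ofList _ x).mp h
  simp at this

theorem ExP_cons_mem (x : Int) (tl other : List Int) (hx : x ∈ other) :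
    ExP (x :: tl) other = ExP ((x :: tl).filter (fun e => !(e == x))) other := by
  rw [rest_eq]
  have hxb : (other.contains x) = true := by simpa [List.contains_iff_mem] using hx
  simp only [ExP, ofList_cons_peel, List.filter_cons, hxb, Bool.not_true,
    Bool.false_eq_true, if_false]
  refine List.map_congr_left (fun k hk => ?_)
  have hkm := (List.mem_filter.mp hk).1
  have hkx : k ≠ x := fun h => x_not_mem_rest x tl (h ▸ hkm)
  rw [count_rest_peel x k tl hkx]

theorem CmP_cons_mem (x : Int) (tl other : List Int) (hx : x ∈ other) :
    CmP (x :: tl) other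
      = (x, ((x :: tl).count x : Int)) :: CmP ((x :: tl).filter (fun e => !(e == x))) other := by
  rw [rest_eq]
  have hxb : (other.contains x) = true := by simpa [List.contains_iff_mem] using hx
  simp only [CmP, ofList_cons_peel, List.filter_cons, hxb, if_pos, List.map_cons]
  congr 1
  refine List.map_congr_left (fun k hk => ?_)
  have hkm := (List.mem_filter.mp hk).1
  have hkx : k ≠ x := fun h => x_not_mem_rest x tl (h ▸ hkm)
  rw [count_rest_peel x k tl hkx]

theorem ExP_cons_not_mem (x : Int) (tl other : List Int) (hx : x ∉ other) :
    ExP (x :: tl) other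
      = (x, ((x :: tl).count x : Int)) :: ExP ((x :: tl).filter (fun e => !(e == x))) other := by
  rw [rest_eq]
  have hxb : (other.contains x) = false := by
    simp [List.contains_iff_mem]; exact hx
  simp only [ExP, ofList_cons_peel, List.filter_cons, hxb, Bool.not_false, if_pos, List.map_cons]
  congr 1
  refine List.map_congr_left (fun k hk => ?_)
  have hkm := (List.mem_filter.mp hk).1
  have hkx : k ≠ x := fun h => x_not_mem_rest x tl (h ▸ hkm)
  rw [count_rest_peel x k tl hkx]

theorem CmP_cons_not_mem (x : Int) (tl other : List Int) (hx : x ∉ other) :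
    CmP (x :: tl) other = CmP ((x :: tl).filter (fun e => !(e == x))) other := by
  rw [rest_eq]
  have hxb : (other.contains x) = false := by
    simp [List.contains_iff_mem]; exact hx
  simp only [CmP, ofList_cons_peel, List.filter_cons, hxb, Bool.false_eq_true, if_false]
  refine List.map_congr_left (fun k hk => ?_)
  have hkm := (List.mem_filter.mp hk).1
  have hkx : k ≠ x := fun h => x_not_mem_rest x tl (h ▸ hkm)
  rw [count_rest_peel x k tl hkx]

theorem peelLoop_spec (other t : List Int) (excl com : List (Int × Int)) :
    peelLoop t other excl com = (excl ++ ExP t other, com ++ CmP t other) := by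
  induction t, excl, com using peelLoop.induct (other := other) with
  | case1 excl com => simp [peelLoop, ExP, CmP, PySem.Set.ofList_nil]
  | case2 excl com x tl rest n hmem ih =>
    simp only [show rest = (x :: tl).filter (fun e => !(e == x)) from rfl,
      show n = ((x :: tl).length : Int) - (((x :: tl).filter (fun e => !(e == x))).length : Int)
        from rfl] at ih
    rw [peelLoop]
    simp only [if_pos hmem]
    rw [ih, ExP_cons_mem x tl other hmem, CmP_cons_mem x tl other hmem,
      count_head_peel x tl, List.append_assoc]
    rfl
  | case3 excl com x tl rest n hmem ih =>
    simp only [show rest = (x :: tl).filter (fun e => !(e == x)) from rfl,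
      show n = ((x :: tl).length : Int) - (((x :: tl).filter (fun e => !(e == x))).length : Int)
        from rfl] at ih
    rw [peelLoop]
    simp only [if_neg hmem]
    rw [ih, ExP_cons_not_mem x tl other hmem, CmP_cons_not_mem x tl other hmem,
      count_head_peel x tl, List.append_assoc]
    rfl

theorem B_items (t1 t2 : List Int) :
    find_dissimilar_alt t1 t2 = M1 t1 t2 ++ M2 t1 t2 ++ M3 t1 t2 := by
  simp only [find_dissimilar_alt, peelLoop_spec, List.nil_append]
  -- d2 = dict(com2): items are exactly CmP t2 t1, keys nodup
  have hnodCm : ∀ (t other : List Int), ((CmP t other).map (fun p => p.1)).Nodup := by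
    intro t other
    simp only [CmP, List.map_map, Function.comp_def]
    simpa using (PySem.Set.nodup_ofList t).filter (fun x => other.contains x)
  have hnodEx : ∀ (t other : List Int), ((ExP t other).map (fun p => p.1)).Nodup := by
    intro t other
    simp only [ExP, List.map_map, Function.comp_def]
    simpa using (PySem.Set.nodup_ofList t).filter (fun x => !(other.contains x))
  have hd2items : (PySem.Dict.ofList (CmP t2 t1)).items = CmP t2 t1 := by
    show ((CmP t2 t1).foldl (fun acc p => acc.insert p.1 p.2) PySem.Dict.empty).items = _
    rw [PySem.Dict.items_foldl_insert_fresh (CmP t2 t1) (fun p => p.1) (fun p => p.2)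
      PySem.Dict.empty (fun a _ => PySem.Dict.contains_empty a.1) (hnodCm t2 t1)]
    simp [show (PySem.Dict.empty : PySem.Dict Int Int).items = [] from rfl]
  have hd2keys : (PySem.Dict.ofList (CmP t2 t1)).keys.Nodup := by
    have : (PySem.Dict.ofList (CmP t2 t1)).keys = (CmP t2 t1).map (fun p => p.1) := by
      simp [PySem.Dict.keys, hd2items]
    rw [this]; exact hnodCm t2 t1
  have hd2getD : ∀ k, k ∈ t1 → k ∈ t2 →
      (PySem.Dict.ofList (CmP t2 t1)).getD k 0 = (t2.count k : Int) := by
    intro k hk1 hk2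
    have hmem : (k, (t2.count k : Int)) ∈ (PySem.Dict.ofList (CmP t2 t1)).items := by
      rw [hd2items]
      exact List.mem_map_of_mem (List.mem_filter.mpr
        ⟨(PySem.Set.mem_ofList t2 k).mpr hk2, by simpa [List.contains_iff_mem] using hk1⟩)
    exact PySem.Dict.getD_of_mem_items _ hmem hd2keys _
  -- first fold: ExP t1 t2 into an empty dict
  have hr1 : ((ExP t1 t2).foldl (fun r p => r.insert p.1 (p.2, (1:Int)))
      (PySem.Dict.empty : PySem.Dict Int (Int × Int))).items = M1 t1 t2 := by
    rw [PySem.Dict.items_foldl_insert_fresh (ExP t1 t2) (fun p => p.1)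
      (fun p => (p.2, (1:Int))) PySem.Dict.empty
      (fun a _ => PySem.Dict.contains_empty a.1) (hnodEx t1 t2)]
    rw [show (PySem.Dict.empty : PySem.Dict Int (Int × Int)).items = [] from rfl,
      List.nil_append]
    simp only [ExP, M1, List.map_map, Function.comp_def]
  set R1 := (ExP t1 t2).foldl (fun r p => r.insert p.1 (p.2, (1:Int)))
      (PySem.Dict.empty : PySem.Dict Int (Int × Int)) with hR1
  have hkR1 : R1.keys = (PySem.Set.ofList t1).filter (fun x => !(t2.contains x)) := by
    simp [PySem.Dict.keys, hr1, M1, Function.comp_def]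
  -- second: update with ex2 pairs (fresh keys: t2-only)
  have hfresh2 : ∀ a ∈ (ExP t2 t1).map (fun p => (p.1, (p.2, (2:Int)))),
      R1.contains a.1 = false := by
    intro a ha
    obtain ⟨p, hp, rfl⟩ := List.mem_map.mp ha
    obtain ⟨k, hk, rfl⟩ := List.mem_map.mp hp
    have hknot : k ∉ t1 := by simpa using (List.mem_filter.mp hk).2
    rw [PySem.Dict.contains_eq_decide_mem_keys, hkR1]
    simp [List.mem_filter, PySem.Set.mem_ofList, hknot]
  have hnod2' : (((ExP t2 t1).map (fun p => (p.1, (p.2, (2:Int))))).map (fun p => p.1)).Nodup := by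
    simpa [List.map_map, Function.comp_def] using hnodEx t2 t1
  have hr2 : (R1.update ((ExP t2 t1).map (fun p => (p.1, (p.2, (2:Int)))))).items
      = M1 t1 t2 ++ M2 t1 t2 := by
    show (((ExP t2 t1).map (fun p => (p.1, (p.2, (2:Int))))).foldl
        (fun acc p => acc.insert p.1 p.2) R1).items = _
    rw [PySem.Dict.items_foldl_insert_fresh ((ExP t2 t1).map (fun p => (p.1, (p.2, (2:Int)))))
      (fun p => p.1) (fun p => p.2) R1 hfresh2 hnod2', hr1]
    simp [ExP, M2, List.map_map, Function.comp_def]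
  set R2 := R1.update ((ExP t2 t1).map (fun p => (p.1, (p.2, (2:Int))))) with hR2
  have hkR2 : R2.keys = (PySem.Set.ofList t1).filter (fun x => !(t2.contains x))
      ++ (PySem.Set.ofList t2).filter (fun x => !(t1.contains x)) := by
    simp [PySem.Dict.keys, hr2, M1, M2, Function.comp_def]
  -- third: update with com1 pairs (fresh keys: common)
  have hfresh3 : ∀ a ∈ (CmP t1 t2).map
      (fun p => (p.1, (p.2, (PySem.Dict.ofList (CmP t2 t1)).getD p.1 0))),
      R2.contains a.1 = false := by
    intro a ha
    obtain ⟨p, hp, rfl⟩ := List.mem_map.mp ha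
    obtain ⟨k, hk, rfl⟩ := List.mem_map.mp hp
    have hk1 : k ∈ t1 := (PySem.Set.mem_ofList t1 k).mp (List.mem_filter.mp hk).1
    have hk2 : k ∈ t2 := by simpa [List.contains_iff_mem] using (List.mem_filter.mp hk).2
    rw [PySem.Dict.contains_eq_decide_mem_keys, hkR2]
    simp [List.mem_filter, PySem.Set.mem_ofList, hk1, hk2]
  have hnod3' : (((CmP t1 t2).map
      (fun p => (p.1, (p.2, (PySem.Dict.ofList (CmP t2 t1)).getD p.1 0)))).map
      (fun p => p.1)).Nodup := by
    simpa [List.map_map, Function.comp_def] using hnodCm t1 t2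
  show (((CmP t1 t2).map
      (fun p => (p.1, (p.2, (PySem.Dict.ofList (CmP t2 t1)).getD p.1 0)))).foldl
      (fun acc p => acc.insert p.1 p.2) R2).items = _
  rw [PySem.Dict.items_foldl_insert_fresh ((CmP t1 t2).map
      (fun p => (p.1, (p.2, (PySem.Dict.ofList (CmP t2 t1)).getD p.1 0))))
    (fun p => p.1) (fun p => p.2) R2 hfresh3 hnod3', hr2]
  congr 1
  have hM3 : M3 t1 t2 = (CmP t1 t2).map (fun p => (p.1, (p.2, (t2.count p.1 : Int)))) := by
    simp [M3, CmP, List.map_map, Function.comp_def]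
  rw [hM3]
  simp only [List.map_map, Function.comp_def, Prod.mk.eta]
  refine List.map_congr_left (fun p hp => ?_)
  simp only [CmP] at hp
  obtain ⟨k, hk, rfl⟩ := List.mem_map.mp hp
  have hk1 : k ∈ t1 := (PySem.Set.mem_ofList t1 k).mp (List.mem_filter.mp hk).1
  have hk2 : k ∈ t2 := by simpa [List.contains_iff_mem] using (List.mem_filter.mp hk).2
  rw [hd2getD k hk1 hk2]

theorem AB_eq (t1 t2 : List Int) :
    find_dissimilar t1 t2 = find_dissimilar_alt t1 t2 := by
  rw [A_items, B_items]

-- ===== VERDICT (by name: the statement is the Claim_ definition above) =====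
theorem find_dissimilar_spec : Claim_equal_find_dissimilar := by
  intro t1 t2 _
  unfold Spec_find_dissimilar
  exact AB_eq t1 t2
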